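-- pv_equiv track=rewrite | github.com/sheldongordon4/multi-agent-fault-detection | scripts/validate_sops.py | parse_header_and_body
-- ===== SOURCE A (Python) =====
-- from typing import Dict, Tuple, List
--
-- def parse_header_and_body(text: str) -> Tuple[Dict[str, str], str]:
--     lines = text.splitlines()
--     meta = {}
--     body_start_idx = 0
--
--     for i, line in enumerate(lines):
--         if not line.strip():
--             body_start_idx = i + 1
--             break
--         if ":" in line:
--             key, val = line.split(":", 1)
--             meta[key.strip().upper()] = val.strip()
--         else:
--             body_start_idx = i
--             break
--
--     body = "\n".join(lines[body_start_idx:])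
--     return meta, body
-- ===== SOURCE B (Python) =====
-- def parse_header_and_body(text):
--     lines = text.splitlines()
--     # first line that ends the header: blank (after strip) or without a ':'
--     boundary = next((i for i, line in enumerate(lines)
--                      if not line.strip() or ":" not in line), None)
--     header = lines if boundary is None else lines[:boundary]
--     meta = {}
--     for line in header:
--         key, val = line.split(":", 1)
--         meta[key.strip().upper()] = val.strip()
--     if boundary is None:
--         body_start = 0
--     elif not lines[boundary].strip():
--         body_start = boundary + 1
--     else:
--         body_start = boundary
--     return meta, "\n".join(lines[body_start:])
-- ===== Notes on version B (the rewrite author's own statement) =====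
-- stated objective: alternative
-- what changed: Replaces A's single break-driven loop that interleaves parsing with boundary detection by a two-phase decomposition: first locate the header/body boundary line, then parse the header slice into meta and join the body slice.
import Mathlib
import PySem

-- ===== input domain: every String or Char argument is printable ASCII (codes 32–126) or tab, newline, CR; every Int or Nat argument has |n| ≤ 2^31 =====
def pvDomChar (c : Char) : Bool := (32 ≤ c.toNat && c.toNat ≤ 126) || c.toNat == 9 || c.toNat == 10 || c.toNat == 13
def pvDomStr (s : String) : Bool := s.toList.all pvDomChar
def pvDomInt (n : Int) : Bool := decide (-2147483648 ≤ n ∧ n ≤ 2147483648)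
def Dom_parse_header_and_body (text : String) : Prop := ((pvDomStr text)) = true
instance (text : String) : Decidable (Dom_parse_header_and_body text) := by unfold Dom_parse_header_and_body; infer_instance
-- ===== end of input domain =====

-- B replaces A's break-driven loop (parse-while-scanning) by a two-phase decomposition:
-- find the boundary line first, then parse lines[:boundary] and join the body slice.

-- ===== PORT A =====
-- `key, val = line.split(":", 1)`: inside the ':' branch the split has exactly two parts,
-- so reading parts 0 and 1 (with "" defaults) is exact there.
def pvStepA (d : PySem.Dict String String) (line : String) : PySem.Dict String String :=
  let parts := (PySem.Str.splitMax? line ":" 1).getD []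
  d.insert (PySem.Str.upper (PySem.Str.strip (parts.headD ""))) (PySem.Str.strip ((parts.drop 1).headD ""))

-- the for-loop with its two breaks; returns (meta, body_start_idx)
def pvLoopA (lines : List String) (i : Nat) (d : PySem.Dict String String) :
    PySem.Dict String String × Nat :=
  match lines with
  | [] => (d, 0)          -- loop finished without break: body_start_idx keeps its initial 0
  | line :: rest =>
    if PySem.Str.strip line = "" then (d, i + 1)
    else if PySem.Str.isIn ":" line then pvLoopA rest (i + 1) (pvStepA d line)
    else (d, i)

def parse_header_and_body (text : String) : (List (String × String)) × String :=
  let lines := PySem.Str.splitlines text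
  let (metaD, bodyStart) := pvLoopA lines 0 PySem.Dict.empty
  (metaD.items, PySem.Str.join "\n" (lines.drop bodyStart))

-- ===== PORT B =====
-- boundary = next((i for i, line in enumerate(lines) if not line.strip() or ":" not in line), None)
def pvFindBoundary (lines : List String) (i : Nat) : Option Nat :=
  match lines with
  | [] => none
  | line :: rest =>
    if PySem.Str.strip line = "" || !PySem.Str.isIn ":" line then some i
    else pvFindBoundary rest (i + 1)

def pvStepB (d : PySem.Dict String String) (line : String) : PySem.Dict String String :=
  let parts := (PySem.Str.splitMax? line ":" 1).getD []
  d.insert (PySem.Str.upper (PySem.Str.strip (parts.headD ""))) (PySem.Str.strip ((parts.drop 1).headD ""))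

def parse_header_and_body_alt (text : String) : (List (String × String)) × String :=
  let lines := PySem.Str.splitlines text
  let boundary := pvFindBoundary lines 0
  let header := match boundary with | none => lines | some b => lines.take b
  let metaD := header.foldl pvStepB PySem.Dict.empty
  let bodyStart :=
    match boundary with
    | none => 0
    | some b =>
      -- lines[boundary]: boundary is a valid index by construction
      if PySem.Str.strip ((PySem.List.pyGet? lines (Int.ofNat b)).getD "") = "" then b + 1 else b
  (metaD.items, PySem.Str.join "\n" (lines.drop bodyStart))

-- ===== PRECONDITION & SPEC =====
def Spec_parse_header_and_body (text : String) (out : (List (String × String)) × String) : Prop := out = parse_header_and_body_alt text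
instance (text : String) (out : (List (String × String)) × String) : Decidable (Spec_parse_header_and_body text out) := by unfold Spec_parse_header_and_body; infer_instance

-- ===== CLAIM (what is proved, stated in full; the proofs are below) =====
def Claim_equal_parse_header_and_body : Prop := ∀ (text : String), Dom_parse_header_and_body text → Spec_parse_header_and_body text (parse_header_and_body text)

-- ===== LEMMAS AND PROOFS =====

lemma pvFindBoundary_ge (lines : List String) (i b : Nat)
    (h : pvFindBoundary lines i = some b) : i ≤ b := by
  induction lines generalizing i with
  | nil => simp [pvFindBoundary] at h
  | cons l rest ih =>
    unfold pvFindBoundary at h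
    split at h
    · simp at h; omega
    · exact Nat.le_of_succ_le (ih (i + 1) h)

lemma pvLoopA_eq (lines : List String) (i : Nat) (d : PySem.Dict String String) :
    pvLoopA lines i d =
      match pvFindBoundary lines i with
      | none => (lines.foldl pvStepB d, 0)
      | some b =>
        ((lines.take (b - i)).foldl pvStepB d,
         if PySem.Str.strip (lines.getD (b - i) "") = "" then b + 1 else b) := by
  induction lines generalizing i d with
  | nil => simp [pvLoopA, pvFindBoundary]
  | cons line rest ih =>
    unfold pvLoopA pvFindBoundary
    by_cases hb : PySem.Str.strip line = ""
    · simp [hb]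
    · by_cases hc : PySem.Str.isIn ":" line = true
      · rw [if_neg hb, if_pos hc, ih (i + 1) (pvStepA d line)]
        have hcf : (PySem.Str.strip line = "" || !PySem.Str.isIn ":" line) = false := by
          simp [hb]; simpa using hc
        simp only [hcf, Bool.false_eq_true, if_false]
        cases hfb : pvFindBoundary rest (i + 1) with
        | none => simp [pvStepA, pvStepB]
        | some b =>
          have hge := pvFindBoundary_ge rest (i + 1) b hfb
          have h1 : b - i = (b - (i + 1)) + 1 := by omega
          simp only [h1, List.take_succ_cons, List.foldl_cons, List.getD_cons_succ]
          rfl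
      · rw [if_neg hb, if_neg hc]
        have hc' : PySem.Chars.isIn [':'] line.toList = false := by simpa using hc
        simp [hc', hb]

-- ===== VERDICT (by name: the statement is the Claim_ definition above) =====
theorem parse_header_and_body_spec : Claim_equal_parse_header_and_body := by
  intro text _
  unfold Spec_parse_header_and_body parse_header_and_body parse_header_and_body_alt
  cases hfb : pvFindBoundary (PySem.Str.splitlines text) 0 with
  | none => simp [pvLoopA_eq, hfb]
  | some b => simp [pvLoopA_eq, hfb]
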